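-- pv_equiv track=rewrite | github.com/gchq/gchq-data-quality | src/gchq_data_quality/spark/dataframe_operations.py | _nested_paths_are_consistent
-- ===== SOURCE A (Python) =====
-- def _is_array_column_name(col_name: str) -> bool:
--     return col_name.endswith("[*]") or col_name.endswith("[]")
--
-- def _split_array_notation(part: str) -> tuple[str, str]:
--     """Splits a column part to its base name and array notation, if any.
--
--     Examples:
--         >>> _split_array_notation("orders[*]")
--         ('orders', '[*]')
--         >>> _split_array_notation("items[]")
--         ('items', '[]')
--         >>> _split_array_notation("customer")
--         ('customer', '')
--     """
--     if part.endswith("[*]"):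
--         return part[:-3], "[*]"
--     elif part.endswith("[]"):
--         return part[:-2], "[]"
--     else:
--         return part, ""
--
-- def _nested_paths_are_consistent(array_paths: list) -> bool:
--     """True if no array level mixes '[*]' and '[]' notation.
--     It does this by counting each string preceding [*] and [], the same
--     string prefix should not have both [*] and [] as notations."""
--     level_notations = {}
--     for path in array_paths:
--         parts = path.split(".")
--         for i, part in enumerate(parts):
--             if _is_array_column_name(part):
--                 base, notation = _split_array_notation(part)
--                 prefix = ".".join(parts[:i] + [base])
--                 level_notations.setdefault(prefix, set()).add(notation)
--                 if len(level_notations[prefix]) > 1: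
--                     return False
--     return True
-- ===== SOURCE B (Python) =====
-- def _nested_paths_are_consistent(array_paths: list) -> bool:
--     """True if no array level mixes '[*]' and '[]' notation.
--
--     Collects every array-notated prefix into one of two sets (by notation)
--     with set comprehensions, then answers with a single disjointness test.
--     """
--     star_prefixes = {
--         ".".join(parts[:i] + [part[:-3]])
--         for path in array_paths
--         for parts in (path.split("."),)
--         for i, part in enumerate(parts)
--         if part.endswith("[*]")
--     }
--     bracket_prefixes = {
--         ".".join(parts[:i] + [part[:-2]])
--         for path in array_paths
--         for parts in (path.split("."),)
--         for i, part in enumerate(parts)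
--         if part.endswith("[]")
--     }
--     return star_prefixes.isdisjoint(bracket_prefixes)
-- ===== Notes on version B (the rewrite author's own statement) =====
-- stated objective: simpler
-- what changed: Replaces A's dict-of-notation-sets with a per-prefix in-loop size guard and early return by two set comprehensions (star prefixes, bracket prefixes) whose disjointness is tested once at the end.
import Mathlib
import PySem

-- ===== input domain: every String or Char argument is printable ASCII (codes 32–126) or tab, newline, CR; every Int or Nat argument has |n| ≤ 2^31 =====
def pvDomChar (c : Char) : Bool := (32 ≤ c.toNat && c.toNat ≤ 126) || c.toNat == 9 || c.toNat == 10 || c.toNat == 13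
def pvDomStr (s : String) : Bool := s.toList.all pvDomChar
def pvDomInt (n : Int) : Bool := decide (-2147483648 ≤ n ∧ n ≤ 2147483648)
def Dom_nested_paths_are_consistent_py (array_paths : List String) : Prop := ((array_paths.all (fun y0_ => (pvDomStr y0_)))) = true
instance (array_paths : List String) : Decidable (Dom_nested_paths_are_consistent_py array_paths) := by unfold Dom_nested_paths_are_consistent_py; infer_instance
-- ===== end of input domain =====

-- B replaces A's dict-of-notation-sets with in-loop early exit by two set comprehensions
-- (star prefixes / bracket prefixes) and a single final disjointness test (objective: simpler).

-- ===== PORT A =====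
def is_array_column_name (col_name : String) : Bool :=
  PySem.Str.endswith col_name "[*]" || PySem.Str.endswith col_name "[]"

def split_array_notation (part : String) : String × String :=
  if PySem.Str.endswith part "[*]" then (PySem.Str.slice part none (some (-3)), "[*]")
  else if PySem.Str.endswith part "[]" then (PySem.Str.slice part none (some (-2)), "[]")
  else (part, "")

-- inner 'for i, part in enumerate(parts)' loop; none = the early 'return False'
def aInner (parts : List String) (d : PySem.Dict String (PySem.Set String)) :
    List (Int × String) → Option (PySem.Dict String (PySem.Set String))
  | [] => some d
  | (i, part) :: rest =>
    if is_array_column_name part then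
      let bn := split_array_notation part
      let pfx := PySem.Str.join "." (PySem.List.slice parts none (some i) ++ [bn.1])
      -- level_notations.setdefault(prefix, set()).add(notation)
      let d' := d.modify pfx PySem.Set.empty (fun s => s.add bn.2)
      if 1 < PySem.Set.len (d'.getD pfx PySem.Set.empty) then none
      else aInner parts d' rest
    else aInner parts d rest

-- outer 'for path in array_paths' loop
def aOuter (d : PySem.Dict String (PySem.Set String)) : List String → Bool
  | [] => true
  | path :: rest =>
    let parts := (PySem.Str.split? path ".").getD []   -- sep "." ≠ "": split? is some
    match aInner parts d (PySem.List.enumerate parts 0) with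
    | none => false
    | some d' => aOuter d' rest

def nested_paths_are_consistent_py (array_paths : List String) : Bool :=
  aOuter PySem.Dict.empty array_paths

-- ===== PORT B =====
-- one set comprehension of Source B: all prefixes whose part ends in `suffix`, cut chars removed
def altPrefixes (array_paths : List String) (suffix : String) (cut : Int) : PySem.Set String :=
  PySem.Set.ofList (array_paths.flatMap (fun path =>
    let parts := (PySem.Str.split? path ".").getD []
    (PySem.List.enumerate parts 0).filterMap (fun ip =>
      if PySem.Str.endswith ip.2 suffix then
        some (PySem.Str.join "." (PySem.List.slice parts none (some ip.1) ++
              [PySem.Str.slice ip.2 none (some cut)]))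
      else none)))

def nested_paths_are_consistent_py_alt (array_paths : List String) : Bool :=
  PySem.Set.isdisjoint (altPrefixes array_paths "[*]" (-3)) (altPrefixes array_paths "[]" (-2))

-- ===== PRECONDITION & SPEC =====
def Spec_nested_paths_are_consistent_py (array_paths : List String) (out : Bool) : Prop := out = nested_paths_are_consistent_py_alt array_paths
instance (array_paths : List String) (out : Bool) : Decidable (Spec_nested_paths_are_consistent_py array_paths out) := by unfold Spec_nested_paths_are_consistent_py; infer_instance

-- ===== CLAIM (what is proved, stated in full; the proofs are below) =====
def Claim_equal_nested_paths_are_consistent_py : Prop := ∀ (array_paths : List String), Dom_nested_paths_are_consistent_py array_paths → Spec_nested_paths_are_consistent_py array_paths (nested_paths_are_consistent_py array_paths)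

-- ===== LEMMAS AND PROOFS =====

-- the (prefix, notation) event stream the two programs both consume
def prefixOf (parts : List String) (i : Int) (base : String) : String :=
  PySem.Str.join "." (PySem.List.slice parts none (some i) ++ [base])

def evOf (parts : List String) : List (Int × String) → List (String × String) :=
  List.filterMap (fun ip =>
    if is_array_column_name ip.2 then
      some (prefixOf parts ip.1 (split_array_notation ip.2).1, (split_array_notation ip.2).2)
    else none)

def evAll (array_paths : List String) : List (String × String) :=
  array_paths.flatMap (fun path =>
    let parts := (PySem.Str.split? path ".").getD []
    evOf parts (PySem.List.enumerate parts 0))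

-- A's computation, re-expressed over the event stream
def aLoop (d : PySem.Dict String (PySem.Set String)) :
    List (String × String) → Option (PySem.Dict String (PySem.Set String))
  | [] => some d
  | (p, n) :: rest =>
    let d' := d.modify p PySem.Set.empty (fun s => s.add n)
    if 1 < PySem.Set.len (d'.getD p PySem.Set.empty) then none
    else aLoop d' rest

def hasBoth (evs : List (String × String)) (d : PySem.Dict String (PySem.Set String)) : Prop :=
  ∃ p, ((p, "[*]") ∈ evs ∨ "[*]" ∈ d.getD p PySem.Set.empty) ∧
       ((p, "[]") ∈ evs ∨ "[]" ∈ d.getD p PySem.Set.empty)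

lemma not_ends_both (l : List Char)
    (h1 : PySem.Chars.endswith l ['[', '*', ']'] = true)
    (h2 : PySem.Chars.endswith l ['[', ']'] = true) : False := by
  rw [PySem.Chars.endswith_iff] at h1 h2
  rcases List.suffix_or_suffix_of_suffix h1 h2 with hs | hs
  · have := hs.length_le; simp at this
  · rcases hs with ⟨t, ht⟩
    have hlen : t.length = 1 := by
      have := congrArg List.length ht; simp at this; omega
    match t, hlen with
    | [c], _ => simp at ht

lemma aInner_eq (parts : List String) (l : List (Int × String))
    (d : PySem.Dict String (PySem.Set String)) :
    aInner parts d l = aLoop d (evOf parts l) := by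
  induction l generalizing d with
  | nil => rfl
  | cons ip rest ih =>
    obtain ⟨i, part⟩ := ip
    by_cases h : is_array_column_name part = true
    · rw [show aInner parts d ((i, part) :: rest) =
          (if 1 < PySem.Set.len ((d.modify
              (PySem.Str.join "." (PySem.List.slice parts none (some i) ++ [(split_array_notation part).1]))
              PySem.Set.empty (fun s => s.add (split_array_notation part).2)).getD
              (PySem.Str.join "." (PySem.List.slice parts none (some i) ++ [(split_array_notation part).1]))
              PySem.Set.empty) then none
           else aInner parts (d.modify
              (PySem.Str.join "." (PySem.List.slice parts none (some i) ++ [(split_array_notation part).1]))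
              PySem.Set.empty (fun s => s.add (split_array_notation part).2)) rest)
          from by simp only [aInner, h, if_pos]]
      simp only [evOf, List.filterMap_cons, h, if_pos, aLoop, prefixOf]
      split_ifs with hlen
      · rfl
      · exact ih _
    · rw [show aInner parts d ((i, part) :: rest) = aInner parts d rest
          from by simp only [aInner, h, Bool.false_eq_true, if_false]]
      simp only [evOf, List.filterMap_cons, h, Bool.false_eq_true, if_false]
      exact ih d

lemma aLoop_append (d : PySem.Dict String (PySem.Set String))
    (xs ys : List (String × String)) :
    aLoop d (xs ++ ys) = (aLoop d xs).bind (fun d' => aLoop d' ys) := by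
  induction xs generalizing d with
  | nil => rfl
  | cons e rest ih =>
    obtain ⟨p, n⟩ := e
    simp only [List.cons_append, aLoop]
    split_ifs with h
    · rfl
    · exact ih _

lemma aOuter_eq (paths : List String) (d : PySem.Dict String (PySem.Set String)) :
    aOuter d paths = (aLoop d (evAll paths)).isSome := by
  induction paths generalizing d with
  | nil => rfl
  | cons path rest ih =>
    simp only [aOuter, evAll, List.flatMap_cons, aLoop_append, aInner_eq]
    cases aLoop d (evOf ((PySem.Str.split? path ".").getD [])
        (PySem.List.enumerate ((PySem.Str.split? path ".").getD []) 0)) with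
    | none => rfl
    | some d' => simpa [evAll] using ih d'

-- invariant: every stored notation set is literally [], ["[*]"] or ["[]"]
def dInv (d : PySem.Dict String (PySem.Set String)) : Prop :=
  ∀ p, d.getD p PySem.Set.empty = [] ∨ d.getD p PySem.Set.empty = ["[*]"] ∨
       d.getD p PySem.Set.empty = ["[]"]

lemma hasBoth_cons_star (d d' : PySem.Dict String (PySem.Set String)) (p : String)
    (rest : List (String × String))
    (hd' : d'.getD p PySem.Set.empty = ["[*]"])
    (hother : ∀ q, q ≠ p → d'.getD q PySem.Set.empty = d.getD q PySem.Set.empty)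
    (hnoc : "[]" ∉ d.getD p PySem.Set.empty) :
    hasBoth ((p, "[*]") :: rest) d ↔ hasBoth rest d' := by
  unfold hasBoth
  apply exists_congr
  intro q
  by_cases hq : q = p
  · subst hq
    constructor
    · rintro ⟨_, h2⟩
      refine ⟨Or.inr (by rw [hd']; simp), ?_⟩
      rcases h2 with h2 | h2
      · rcases List.mem_cons.mp h2 with h2 | h2
        · exact absurd (congrArg Prod.snd h2) (by simp)
        · exact Or.inl h2
      · exact absurd h2 hnoc
    · rintro ⟨_, h2⟩
      refine ⟨Or.inl (List.mem_cons_self ..), ?_⟩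
      rcases h2 with h2 | h2
      · exact Or.inl (List.mem_cons_of_mem _ h2)
      · rw [hd'] at h2; simp at h2
  · rw [hother q hq]
    constructor
    · rintro ⟨h1, h2⟩
      refine ⟨?_, ?_⟩
      · rcases h1 with h1 | h1
        · rcases List.mem_cons.mp h1 with h1 | h1
          · exact absurd (congrArg Prod.fst h1) hq
          · exact Or.inl h1
        · exact Or.inr h1
      · rcases h2 with h2 | h2
        · rcases List.mem_cons.mp h2 with h2 | h2
          · exact absurd (congrArg Prod.fst h2) hq
          · exact Or.inl h2
        · exact Or.inr h2
    · rintro ⟨h1, h2⟩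
      exact ⟨h1.imp (List.mem_cons_of_mem _) id, h2.imp (List.mem_cons_of_mem _) id⟩

lemma hasBoth_cons_bracket (d d' : PySem.Dict String (PySem.Set String)) (p : String)
    (rest : List (String × String))
    (hd' : d'.getD p PySem.Set.empty = ["[]"])
    (hother : ∀ q, q ≠ p → d'.getD q PySem.Set.empty = d.getD q PySem.Set.empty)
    (hnoc : "[*]" ∉ d.getD p PySem.Set.empty) :
    hasBoth ((p, "[]") :: rest) d ↔ hasBoth rest d' := by
  unfold hasBoth
  apply exists_congr
  intro q
  by_cases hq : q = p
  · subst hq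
    constructor
    · rintro ⟨h1, _⟩
      refine ⟨?_, Or.inr (by rw [hd']; simp)⟩
      rcases h1 with h1 | h1
      · rcases List.mem_cons.mp h1 with h1 | h1
        · exact absurd (congrArg Prod.snd h1) (by simp)
        · exact Or.inl h1
      · exact absurd h1 hnoc
    · rintro ⟨h1, _⟩
      refine ⟨?_, Or.inl (List.mem_cons_self ..)⟩
      rcases h1 with h1 | h1
      · exact Or.inl (List.mem_cons_of_mem _ h1)
      · rw [hd'] at h1; simp at h1
  · rw [hother q hq]
    constructor
    · rintro ⟨h1, h2⟩
      refine ⟨?_, ?_⟩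
      · rcases h1 with h1 | h1
        · rcases List.mem_cons.mp h1 with h1 | h1
          · exact absurd (congrArg Prod.fst h1) hq
          · exact Or.inl h1
        · exact Or.inr h1
      · rcases h2 with h2 | h2
        · rcases List.mem_cons.mp h2 with h2 | h2
          · exact absurd (congrArg Prod.fst h2) hq
          · exact Or.inl h2
        · exact Or.inr h2
    · rintro ⟨h1, h2⟩
      exact ⟨h1.imp (List.mem_cons_of_mem _) id, h2.imp (List.mem_cons_of_mem _) id⟩

lemma aLoop_isSome_iff (evs : List (String × String))
    (hn : ∀ e ∈ evs, e.2 = "[*]" ∨ e.2 = "[]")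
    (d : PySem.Dict String (PySem.Set String)) (hd : dInv d) :
    (aLoop d evs).isSome = true ↔ ¬ hasBoth evs d := by
  induction evs generalizing d with
  | nil =>
    simp only [aLoop, Option.isSome_some, hasBoth, true_iff]
    rintro ⟨p, h1, h2⟩
    simp only [List.not_mem_nil, false_or] at h1 h2
    rcases hd p with h | h | h <;> rw [h] at h1 h2 <;> simp_all
  | cons e rest ih =>
    obtain ⟨p, n⟩ := e
    have hne : n = "[*]" ∨ n = "[]" := hn (p, n) (List.mem_cons_self ..)
    have hrest : ∀ e ∈ rest, e.2 = "[*]" ∨ e.2 = "[]" :=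
      fun e he => hn e (List.mem_cons_of_mem _ he)
    simp only [aLoop]
    rw [PySem.Dict.getD_modify_self]
    have hother : ∀ q, q ≠ p →
        (d.modify p PySem.Set.empty (fun s => s.add n)).getD q PySem.Set.empty =
          d.getD q PySem.Set.empty :=
      fun q hq => PySem.Dict.getD_modify_of_ne _ _ _ hq
    have hself : (d.modify p PySem.Set.empty (fun s => s.add n)).getD p PySem.Set.empty =
        (d.getD p PySem.Set.empty).add n := PySem.Dict.getD_modify_self _ _ _ _
    rcases hne with rfl | rfl
    · rcases hd p with hc | hc | hc
      all_goals rw [hc]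
      -- s = [] : add gives ["[*]"], no conflict
      · rw [if_neg (by decide)]
        rw [ih hrest _ (by
          intro q; by_cases hq : q = p
          · subst hq; rw [hself, hc]; right; left; rfl
          · rw [hother q hq]; exact hd q)]
        rw [hasBoth_cons_star d _ p rest (by rw [hself, hc]; rfl) hother (by rw [hc]; simp)]
      · rw [if_neg (by decide)]
        rw [ih hrest _ (by
          intro q; by_cases hq : q = p
          · subst hq; rw [hself, hc]; right; left; rfl
          · rw [hother q hq]; exact hd q)]
        rw [hasBoth_cons_star d _ p rest (by rw [hself, hc]; rfl) hother (by rw [hc]; decide)]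
      -- s = ["[]"] : conflict, A returns False and hasBoth holds
      · rw [if_pos (by decide)]
        simp only [Option.isSome_none, Bool.false_eq_true, false_iff, not_not]
        exact ⟨p, Or.inl (List.mem_cons_self ..), Or.inr (by rw [hc]; simp)⟩
    · rcases hd p with hc | hc | hc
      all_goals rw [hc]
      · rw [if_neg (by decide)]
        rw [ih hrest _ (by
          intro q; by_cases hq : q = p
          · subst hq; rw [hself, hc]; right; right; rfl
          · rw [hother q hq]; exact hd q)]
        rw [hasBoth_cons_bracket d _ p rest (by rw [hself, hc]; rfl) hother (by rw [hc]; simp)]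
      · rw [if_pos (by decide)]
        simp only [Option.isSome_none, Bool.false_eq_true, false_iff, not_not]
        exact ⟨p, Or.inr (by rw [hc]; simp), Or.inl (List.mem_cons_self ..)⟩
      · rw [if_neg (by decide)]
        rw [ih hrest _ (by
          intro q; by_cases hq : q = p
          · subst hq; rw [hself, hc]; right; right; rfl
          · rw [hother q hq]; exact hd q)]
        rw [hasBoth_cons_bracket d _ p rest (by rw [hself, hc]; rfl) hother (by rw [hc]; decide)]

-- B's two prefix lists are the event stream filtered by notation
lemma altPrefixes_star (paths : List String) :
    (altPrefixes paths "[*]" (-3) : List String) =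
      PySem.Set.ofList ((evAll paths).filterMap
        (fun e => if e.2 = "[*]" then some e.1 else none)) := by
  unfold altPrefixes evAll
  congr 1
  rw [List.filterMap_flatMap]
  apply List.flatMap_congr
  intro path _
  simp only [List.filterMap_filterMap, evOf]
  apply List.filterMap_congr
  intro ip _
  by_cases h : PySem.Chars.endswith ip.2.toList ['[', '*', ']'] = true
  · simp [h, is_array_column_name, split_array_notation, prefixOf]
  · by_cases h2 : PySem.Chars.endswith ip.2.toList ['[', ']'] = true
    · simp [h, h2, is_array_column_name, split_array_notation]
    · simp [h, h2, is_array_column_name]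

lemma altPrefixes_bracket (paths : List String) :
    (altPrefixes paths "[]" (-2) : List String) =
      PySem.Set.ofList ((evAll paths).filterMap
        (fun e => if e.2 = "[]" then some e.1 else none)) := by
  unfold altPrefixes evAll
  congr 1
  rw [List.filterMap_flatMap]
  apply List.flatMap_congr
  intro path _
  simp only [List.filterMap_filterMap, evOf]
  apply List.filterMap_congr
  intro ip _
  by_cases h : PySem.Chars.endswith ip.2.toList ['[', '*', ']'] = true
  · have h2 : PySem.Chars.endswith ip.2.toList ['[', ']'] = false := by
      by_contra hb
      rw [Bool.not_eq_false] at hb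
      exact not_ends_both _ h hb
    simp [h, h2, is_array_column_name, split_array_notation]
  · by_cases h2 : PySem.Chars.endswith ip.2.toList ['[', ']'] = true
    · simp [h, h2, is_array_column_name, split_array_notation, prefixOf]
    · simp [h, h2, is_array_column_name]

lemma evAll_notations (paths : List String) :
    ∀ e ∈ evAll paths, e.2 = "[*]" ∨ e.2 = "[]" := by
  intro e he
  simp only [evAll, List.mem_flatMap] at he
  obtain ⟨path, _, he⟩ := he
  simp only [evOf, List.mem_filterMap] at he
  obtain ⟨ip, _, he⟩ := he
  by_cases h : is_array_column_name ip.2 = true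
  · rw [if_pos h] at he
    rw [← Option.some.inj he]
    unfold split_array_notation
    split_ifs with h1 h2
    · left; rfl
    · right; rfl
    · exfalso
      unfold is_array_column_name at h
      rw [Bool.or_eq_true] at h
      rcases h with hx | hx
      · exact h1 hx
      · exact h2 hx
  · rw [if_neg h] at he; exact absurd he (by simp)

lemma dInv_empty : dInv PySem.Dict.empty := by
  intro p; left; rfl

theorem main_eq (paths : List String) :
    nested_paths_are_consistent_py paths = nested_paths_are_consistent_py_alt paths := by
  unfold nested_paths_are_consistent_py nested_paths_are_consistent_py_alt
  rw [aOuter_eq]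
  have hA := aLoop_isSome_iff (evAll paths) (evAll_notations paths) PySem.Dict.empty dInv_empty
  have hempty : ∀ p : String,
      (PySem.Dict.empty : PySem.Dict String (PySem.Set String)).getD p PySem.Set.empty = [] :=
    fun _ => rfl
  have hBmemS : ∀ x, x ∈ (altPrefixes paths "[*]" (-3) : List String) ↔ (x, "[*]") ∈ evAll paths := by
    intro x
    rw [altPrefixes_star, PySem.Set.mem_ofList, List.mem_filterMap]
    constructor
    · rintro ⟨⟨p', n'⟩, he, hx⟩
      split_ifs at hx with h
      · obtain rfl := Option.some.inj hx
        simp only at h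
        subst h
        exact he

    · intro h; exact ⟨(x, "[*]"), h, by simp⟩
  have hBmemB : ∀ x, x ∈ (altPrefixes paths "[]" (-2) : List String) ↔ (x, "[]") ∈ evAll paths := by
    intro x
    rw [altPrefixes_bracket, PySem.Set.mem_ofList, List.mem_filterMap]
    constructor
    · rintro ⟨⟨p', n'⟩, he, hx⟩
      split_ifs at hx with h
      · obtain rfl := Option.some.inj hx
        simp only at h
        subst h
        exact he

    · intro h; exact ⟨(x, "[]"), h, by simp⟩
  by_cases hB : PySem.Set.isdisjoint (altPrefixes paths "[*]" (-3)) (altPrefixes paths "[]" (-2)) = true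
  · rw [hB, hA]
    rintro ⟨p, h1, h2⟩
    have h1' : (p, "[*]") ∈ evAll paths := by
      rcases h1 with h | h
      · exact h
      · rw [hempty p] at h; simp at h
    have h2' : (p, "[]") ∈ evAll paths := by
      rcases h2 with h | h
      · exact h
      · rw [hempty p] at h; simp at h
    rw [PySem.Set.isdisjoint_iff] at hB
    exact hB p ((hBmemS p).mpr h1') ((hBmemB p).mpr h2')
  · rw [Bool.not_eq_true] at hB
    rw [hB, ← Bool.not_eq_true, hA, not_not]
    have : ¬ ∀ x ∈ (altPrefixes paths "[*]" (-3) : List String),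
        x ∉ (altPrefixes paths "[]" (-2) : List String) := by
      rw [← PySem.Set.isdisjoint_iff]; simp [hB]
    push Not at this
    obtain ⟨p, hp1, hp2⟩ := this
    exact ⟨p, Or.inl ((hBmemS p).mp hp1), Or.inl ((hBmemB p).mp hp2)⟩

-- ===== VERDICT (by name: the statement is the Claim_ definition above) =====
theorem nested_paths_are_consistent_py_spec : Claim_equal_nested_paths_are_consistent_py := by
  intro paths _
  unfold Spec_nested_paths_are_consistent_py
  exact main_eq paths
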